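-- pv_equiv track=rewrite | github.com/turman17/SmartFileSorter | main.py | where_to_move
-- ===== SOURCE A (Python) =====
-- destination_pdf = "/Users/user/Downloads/PDF/"
--
-- destination_img = "/Users/user/Downloads/IMG/"
--
-- destination_audio = "/Users/user/Downloads/AUDIO/"
--
-- destination_video = "/Users/user/Downloads/VIDEO/"
--
-- source_dir = "/Users/user/Downloads"
--
-- def where_to_move(file):
--     if file.endswith(".pdf"):
--         return destination_pdf
--     elif any(file.endswith(ext) for ext in [".jpg", ".png", ".jpeg", ".heic"]):
--         return destination_img
--     elif any(file.endswith(ext) for ext in [".mp3", ".wav"]):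
--         return destination_audio
--     elif any(file.endswith(ext) for ext in [".mp4", ".avi", ".mov"]):
--         return destination_video
--     else:
--         return source_dir
-- ===== SOURCE B (Python) =====
-- destination_pdf = "/Users/user/Downloads/PDF/"
--
-- destination_img = "/Users/user/Downloads/IMG/"
--
-- destination_audio = "/Users/user/Downloads/AUDIO/"
--
-- destination_video = "/Users/user/Downloads/VIDEO/"
--
-- source_dir = "/Users/user/Downloads"
--
-- # B: a trie/DFA over the REVERSED file name.  The extension table is compiled
-- # once into a transition table; where_to_move walks the file's characters
-- # back-to-front one at a time and stops at the first accepting state (no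
-- # suffix comparisons at all).  The reversed extensions are prefix-free, so at
-- # most one accepting state is reachable and A's if/elif order is immaterial.
-- _EXTENSIONS = [(".pdf", destination_pdf),
--                (".jpg", destination_img), (".png", destination_img),
--                (".jpeg", destination_img), (".heic", destination_img),
--                (".mp3", destination_audio), (".wav", destination_audio),
--                (".mp4", destination_video), (".avi", destination_video),
--                (".mov", destination_video)]
--
--
-- def _build_dfa(pairs):
--     trans = {}
--     accept = {}
--     count = 1
--     for ext, dest in pairs:
--         s = 0
--         for ch in reversed(ext):
--             key = (s, ch)
--             if key not in trans:
--                 trans[key] = count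
--                 count += 1
--             s = trans[key]
--         accept[s] = dest
--     return trans, accept
--
--
-- _TRANS, _ACCEPT = _build_dfa(_EXTENSIONS)
--
--
-- def where_to_move(file):
--     s = 0
--     for ch in reversed(file):
--         s = _TRANS.get((s, ch))
--         if s is None:
--             return source_dir
--         d = _ACCEPT.get(s)
--         if d is not None:
--             return d
--     return source_dir
-- ===== Notes on version B (the rewrite author's own statement) =====
-- stated objective: alternative
-- what changed: Replaces the endswith if/elif chain (inner any() scans over extension lists) by a trie/DFA compiled once from the extension table: where_to_move walks the file's characters back-to-front through the transition table and returns at the first accepting state, never comparing whole suffixes; the reversed extensions are prefix-free so the chain's ordering is immaterial.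
import Mathlib
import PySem

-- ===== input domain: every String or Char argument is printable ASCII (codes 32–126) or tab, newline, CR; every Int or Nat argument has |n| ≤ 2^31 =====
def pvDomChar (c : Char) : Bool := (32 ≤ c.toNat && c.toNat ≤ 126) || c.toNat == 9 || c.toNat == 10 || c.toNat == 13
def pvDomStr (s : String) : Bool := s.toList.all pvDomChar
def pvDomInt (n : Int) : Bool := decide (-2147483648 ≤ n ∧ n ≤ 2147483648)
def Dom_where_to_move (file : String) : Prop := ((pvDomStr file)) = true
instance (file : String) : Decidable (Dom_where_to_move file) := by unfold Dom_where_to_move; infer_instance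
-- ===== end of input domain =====

-- B replaces A's endswith if/elif chain by a trie/DFA compiled once from the extension table
-- and walked over the file's characters back to front; objective: alternative algorithm.

-- ===== PORT A =====
def destination_pdf : String := "/Users/user/Downloads/PDF/"
def destination_img : String := "/Users/user/Downloads/IMG/"
def destination_audio : String := "/Users/user/Downloads/AUDIO/"
def destination_video : String := "/Users/user/Downloads/VIDEO/"
def source_dir : String := "/Users/user/Downloads"

def where_to_move (file : String) : String :=
  if PySem.Str.endswith file ".pdf" then destination_pdf
  else if [".jpg", ".png", ".jpeg", ".heic"].any (fun ext => PySem.Str.endswith file ext) then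
    destination_img
  else if [".mp3", ".wav"].any (fun ext => PySem.Str.endswith file ext) then destination_audio
  else if [".mp4", ".avi", ".mov"].any (fun ext => PySem.Str.endswith file ext) then
    destination_video
  else source_dir

-- ===== PORT B =====
def pvEXTENSIONS : List (String × String) :=
  [(".pdf", destination_pdf),
   (".jpg", destination_img), (".png", destination_img),
   (".jpeg", destination_img), (".heic", destination_img),
   (".mp3", destination_audio), (".wav", destination_audio),
   (".mp4", destination_video), (".avi", destination_video),
   (".mov", destination_video)]

-- _build_dfa: fold over the pairs; state = (trans, accept, count); the inner fold over
-- the reversed extension characters carries (trans, count, s) exactly as the Python loop.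
def pvBuildDfa (pairs : List (String × String)) :
    PySem.Dict (Int × Char) Int × PySem.Dict Int String :=
  let res := pairs.foldl
    (fun (acc : PySem.Dict (Int × Char) Int × PySem.Dict Int String × Int) p =>
      let inner := p.1.toList.reverse.foldl
        (fun (ac : PySem.Dict (Int × Char) Int × Int × Int) ch =>
          let key : Int × Char := (ac.2.2, ch)
          match ac.1.get? key with
          | some s' => (ac.1, ac.2.1, s')
          | none => (ac.1.insert key ac.2.1, ac.2.1 + 1, ac.2.1))
        (acc.1, acc.2.2, (0 : Int))
      (inner.1, acc.2.1.insert inner.2.2 p.2, inner.2.1))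
    (PySem.Dict.mk [], PySem.Dict.mk [], (1 : Int))
  (res.1, res.2.1)

def pvTRANS : PySem.Dict (Int × Char) Int := (pvBuildDfa pvEXTENSIONS).1
def pvACCEPT : PySem.Dict Int String := (pvBuildDfa pvEXTENSIONS).2

-- the for-loop of B's where_to_move, as structural recursion over the reversed characters
-- (the module-level tables _TRANS/_ACCEPT are passed as the first two arguments)
def pvRun (trans : PySem.Dict (Int × Char) Int) (accept : PySem.Dict Int String)
    (s : Int) : List Char → String
  | [] => source_dir
  | ch :: t =>
    match trans.get? (s, ch) with
    | none => source_dir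
    | some s' =>
      match accept.get? s' with
      | some d => d
      | none => pvRun trans accept s' t

def where_to_move_alt (file : String) : String :=
  pvRun pvTRANS pvACCEPT 0 file.toList.reverse

-- ===== PRECONDITION & SPEC =====
def Spec_where_to_move (file : String) (out : String) : Prop := out = where_to_move_alt file
instance (file : String) (out : String) : Decidable (Spec_where_to_move file out) := by unfold Spec_where_to_move; infer_instance

-- ===== CLAIM (what is proved, stated in full; the proofs are below) =====
def Claim_equal_where_to_move : Prop := ∀ (file : String), Dom_where_to_move file → Spec_where_to_move file (where_to_move file)

-- ===== LEMMAS AND PROOFS =====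

-- endswith on the reversed character list: a take-and-compare
theorem pv_endswith_eq_rtake (s p : List Char) :
    PySem.Chars.endswith s p = (List.take p.length s.reverse == p.reverse) := by
  rw [Bool.eq_iff_iff]
  simp only [PySem.Chars.endswith_iff, beq_iff_eq]
  rw [← List.reverse_prefix, List.prefix_iff_eq_take]
  rw [List.length_reverse, eq_comm]

theorem pv_pair_beq (x y : Int) (c d : Char) :
    ((x, c) == (y, d)) = (x == y && c == d) := rfl

theorem pv_gnil {K V : Type} [BEq K] (x : K) :
    (PySem.Dict.mk ([] : List (K × V))).get? x = none := rfl

-- the DFA tables pvBuildDfa compiles from pvEXTENSIONS, as literal dictionaries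
def pvTLit : PySem.Dict (Int × Char) Int := PySem.Dict.mk
    [((0, 'f'), 1), ((1, 'd'), 2), ((2, 'p'), 3), ((3, '.'), 4),
     ((0, 'g'), 5), ((5, 'p'), 6), ((6, 'j'), 7), ((7, '.'), 8),
     ((5, 'n'), 9), ((9, 'p'), 10), ((10, '.'), 11),
     ((5, 'e'), 12), ((12, 'p'), 13), ((13, 'j'), 14), ((14, '.'), 15),
     ((0, 'c'), 16), ((16, 'i'), 17), ((17, 'e'), 18), ((18, 'h'), 19), ((19, '.'), 20),
     ((0, '3'), 21), ((21, 'p'), 22), ((22, 'm'), 23), ((23, '.'), 24),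
     ((0, 'v'), 25), ((25, 'a'), 26), ((26, 'w'), 27), ((27, '.'), 28),
     ((0, '4'), 29), ((29, 'p'), 30), ((30, 'm'), 31), ((31, '.'), 32),
     ((0, 'i'), 33), ((33, 'v'), 34), ((34, 'a'), 35), ((35, '.'), 36),
     ((25, 'o'), 37), ((37, 'm'), 38), ((38, '.'), 39)]

def pvALit : PySem.Dict Int String := PySem.Dict.mk
    [(4, destination_pdf), (8, destination_img), (11, destination_img),
     (15, destination_img), (20, destination_img), (24, destination_audio),
     (28, destination_audio), (32, destination_video), (36, destination_video),
     (39, destination_video)]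

set_option maxRecDepth 40000 in
theorem pv_hT : pvTRANS = pvTLit := by decide

set_option maxRecDepth 100000 in
theorem pv_hA : pvACCEPT = pvALit := by decide

set_option maxRecDepth 40000 in
theorem pv_g0 (c : Char) : pvTLit.get? (0, c) = if c = 'f' then some 1 else if c = 'g' then some 5 else if c = 'c' then some 16 else if c = '3' then some 21 else if c = 'v' then some 25 else if c = '4' then some 29 else if c = 'i' then some 33 else none := by
  by_cases h1 : c = 'f'
  · subst h1; rfl
  by_cases h2 : c = 'g'
  · subst h2; rfl
  by_cases h3 : c = 'c'
  · subst h3; rfl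
  by_cases h4 : c = '3'
  · subst h4; rfl
  by_cases h5 : c = 'v'
  · subst h5; rfl
  by_cases h6 : c = '4'
  · subst h6; rfl
  by_cases h7 : c = 'i'
  · subst h7; rfl
  simp [pvTLit, PySem.Dict.get?_mk_cons, pv_pair_beq, pv_gnil, h1, h2, h3, h4, h5, h6, h7, Ne.symm h1, Ne.symm h2, Ne.symm h3, Ne.symm h4, Ne.symm h5, Ne.symm h6, Ne.symm h7]

set_option maxRecDepth 40000 in
theorem pv_step0 (c : Char) (t : List Char) : pvRun pvTLit pvALit 0 (c :: t) = if c = 'f' then pvRun pvTLit pvALit 1 t else if c = 'g' then pvRun pvTLit pvALit 5 t else if c = 'c' then pvRun pvTLit pvALit 16 t else if c = '3' then pvRun pvTLit pvALit 21 t else if c = 'v' then pvRun pvTLit pvALit 25 t else if c = '4' then pvRun pvTLit pvALit 29 t else if c = 'i' then pvRun pvTLit pvALit 33 t else source_dir := by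
  rw [pvRun, pv_g0]; split_ifs <;> rfl

set_option maxRecDepth 40000 in
theorem pv_g1 (c : Char) : pvTLit.get? (1, c) = if c = 'd' then some 2 else none := by
  by_cases h1 : c = 'd'
  · subst h1; rfl
  simp [pvTLit, PySem.Dict.get?_mk_cons, pv_pair_beq, pv_gnil, h1, Ne.symm h1]

set_option maxRecDepth 40000 in
theorem pv_step1 (c : Char) (t : List Char) : pvRun pvTLit pvALit 1 (c :: t) = if c = 'd' then pvRun pvTLit pvALit 2 t else source_dir := by
  rw [pvRun, pv_g1]; split_ifs <;> rfl

set_option maxRecDepth 40000 in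
theorem pv_g2 (c : Char) : pvTLit.get? (2, c) = if c = 'p' then some 3 else none := by
  by_cases h1 : c = 'p'
  · subst h1; rfl
  simp [pvTLit, PySem.Dict.get?_mk_cons, pv_pair_beq, pv_gnil, h1, Ne.symm h1]

set_option maxRecDepth 40000 in
theorem pv_step2 (c : Char) (t : List Char) : pvRun pvTLit pvALit 2 (c :: t) = if c = 'p' then pvRun pvTLit pvALit 3 t else source_dir := by
  rw [pvRun, pv_g2]; split_ifs <;> rfl

set_option maxRecDepth 40000 in
theorem pv_g3 (c : Char) : pvTLit.get? (3, c) = if c = '.' then some 4 else none := by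
  by_cases h1 : c = '.'
  · subst h1; rfl
  simp [pvTLit, PySem.Dict.get?_mk_cons, pv_pair_beq, pv_gnil, h1, Ne.symm h1]

set_option maxRecDepth 40000 in
theorem pv_step3 (c : Char) (t : List Char) : pvRun pvTLit pvALit 3 (c :: t) = if c = '.' then destination_pdf else source_dir := by
  rw [pvRun, pv_g3]; split_ifs <;> rfl

set_option maxRecDepth 40000 in
theorem pv_g5 (c : Char) : pvTLit.get? (5, c) = if c = 'p' then some 6 else if c = 'n' then some 9 else if c = 'e' then some 12 else none := by
  by_cases h1 : c = 'p'
  · subst h1; rfl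
  by_cases h2 : c = 'n'
  · subst h2; rfl
  by_cases h3 : c = 'e'
  · subst h3; rfl
  simp [pvTLit, PySem.Dict.get?_mk_cons, pv_pair_beq, pv_gnil, h1, h2, h3, Ne.symm h1, Ne.symm h2, Ne.symm h3]

set_option maxRecDepth 40000 in
theorem pv_step5 (c : Char) (t : List Char) : pvRun pvTLit pvALit 5 (c :: t) = if c = 'p' then pvRun pvTLit pvALit 6 t else if c = 'n' then pvRun pvTLit pvALit 9 t else if c = 'e' then pvRun pvTLit pvALit 12 t else source_dir := by
  rw [pvRun, pv_g5]; split_ifs <;> rfl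

set_option maxRecDepth 40000 in
theorem pv_g6 (c : Char) : pvTLit.get? (6, c) = if c = 'j' then some 7 else none := by
  by_cases h1 : c = 'j'
  · subst h1; rfl
  simp [pvTLit, PySem.Dict.get?_mk_cons, pv_pair_beq, pv_gnil, h1, Ne.symm h1]

set_option maxRecDepth 40000 in
theorem pv_step6 (c : Char) (t : List Char) : pvRun pvTLit pvALit 6 (c :: t) = if c = 'j' then pvRun pvTLit pvALit 7 t else source_dir := by
  rw [pvRun, pv_g6]; split_ifs <;> rfl

set_option maxRecDepth 40000 in
theorem pv_g7 (c : Char) : pvTLit.get? (7, c) = if c = '.' then some 8 else none := by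
  by_cases h1 : c = '.'
  · subst h1; rfl
  simp [pvTLit, PySem.Dict.get?_mk_cons, pv_pair_beq, pv_gnil, h1, Ne.symm h1]

set_option maxRecDepth 40000 in
theorem pv_step7 (c : Char) (t : List Char) : pvRun pvTLit pvALit 7 (c :: t) = if c = '.' then destination_img else source_dir := by
  rw [pvRun, pv_g7]; split_ifs <;> rfl

set_option maxRecDepth 40000 in
theorem pv_g9 (c : Char) : pvTLit.get? (9, c) = if c = 'p' then some 10 else none := by
  by_cases h1 : c = 'p'
  · subst h1; rfl
  simp [pvTLit, PySem.Dict.get?_mk_cons, pv_pair_beq, pv_gnil, h1, Ne.symm h1]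

set_option maxRecDepth 40000 in
theorem pv_step9 (c : Char) (t : List Char) : pvRun pvTLit pvALit 9 (c :: t) = if c = 'p' then pvRun pvTLit pvALit 10 t else source_dir := by
  rw [pvRun, pv_g9]; split_ifs <;> rfl

set_option maxRecDepth 40000 in
theorem pv_g10 (c : Char) : pvTLit.get? (10, c) = if c = '.' then some 11 else none := by
  by_cases h1 : c = '.'
  · subst h1; rfl
  simp [pvTLit, PySem.Dict.get?_mk_cons, pv_pair_beq, pv_gnil, h1, Ne.symm h1]

set_option maxRecDepth 40000 in
theorem pv_step10 (c : Char) (t : List Char) : pvRun pvTLit pvALit 10 (c :: t) = if c = '.' then destination_img else source_dir := by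
  rw [pvRun, pv_g10]; split_ifs <;> rfl

set_option maxRecDepth 40000 in
theorem pv_g12 (c : Char) : pvTLit.get? (12, c) = if c = 'p' then some 13 else none := by
  by_cases h1 : c = 'p'
  · subst h1; rfl
  simp [pvTLit, PySem.Dict.get?_mk_cons, pv_pair_beq, pv_gnil, h1, Ne.symm h1]

set_option maxRecDepth 40000 in
theorem pv_step12 (c : Char) (t : List Char) : pvRun pvTLit pvALit 12 (c :: t) = if c = 'p' then pvRun pvTLit pvALit 13 t else source_dir := by
  rw [pvRun, pv_g12]; split_ifs <;> rfl

set_option maxRecDepth 40000 in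
theorem pv_g13 (c : Char) : pvTLit.get? (13, c) = if c = 'j' then some 14 else none := by
  by_cases h1 : c = 'j'
  · subst h1; rfl
  simp [pvTLit, PySem.Dict.get?_mk_cons, pv_pair_beq, pv_gnil, h1, Ne.symm h1]

set_option maxRecDepth 40000 in
theorem pv_step13 (c : Char) (t : List Char) : pvRun pvTLit pvALit 13 (c :: t) = if c = 'j' then pvRun pvTLit pvALit 14 t else source_dir := by
  rw [pvRun, pv_g13]; split_ifs <;> rfl

set_option maxRecDepth 40000 in
theorem pv_g14 (c : Char) : pvTLit.get? (14, c) = if c = '.' then some 15 else none := by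
  by_cases h1 : c = '.'
  · subst h1; rfl
  simp [pvTLit, PySem.Dict.get?_mk_cons, pv_pair_beq, pv_gnil, h1, Ne.symm h1]

set_option maxRecDepth 40000 in
theorem pv_step14 (c : Char) (t : List Char) : pvRun pvTLit pvALit 14 (c :: t) = if c = '.' then destination_img else source_dir := by
  rw [pvRun, pv_g14]; split_ifs <;> rfl

set_option maxRecDepth 40000 in
theorem pv_g16 (c : Char) : pvTLit.get? (16, c) = if c = 'i' then some 17 else none := by
  by_cases h1 : c = 'i'
  · subst h1; rfl
  simp [pvTLit, PySem.Dict.get?_mk_cons, pv_pair_beq, pv_gnil, h1, Ne.symm h1]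

set_option maxRecDepth 40000 in
theorem pv_step16 (c : Char) (t : List Char) : pvRun pvTLit pvALit 16 (c :: t) = if c = 'i' then pvRun pvTLit pvALit 17 t else source_dir := by
  rw [pvRun, pv_g16]; split_ifs <;> rfl

set_option maxRecDepth 40000 in
theorem pv_g17 (c : Char) : pvTLit.get? (17, c) = if c = 'e' then some 18 else none := by
  by_cases h1 : c = 'e'
  · subst h1; rfl
  simp [pvTLit, PySem.Dict.get?_mk_cons, pv_pair_beq, pv_gnil, h1, Ne.symm h1]

set_option maxRecDepth 40000 in
theorem pv_step17 (c : Char) (t : List Char) : pvRun pvTLit pvALit 17 (c :: t) = if c = 'e' then pvRun pvTLit pvALit 18 t else source_dir := by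
  rw [pvRun, pv_g17]; split_ifs <;> rfl

set_option maxRecDepth 40000 in
theorem pv_g18 (c : Char) : pvTLit.get? (18, c) = if c = 'h' then some 19 else none := by
  by_cases h1 : c = 'h'
  · subst h1; rfl
  simp [pvTLit, PySem.Dict.get?_mk_cons, pv_pair_beq, pv_gnil, h1, Ne.symm h1]

set_option maxRecDepth 40000 in
theorem pv_step18 (c : Char) (t : List Char) : pvRun pvTLit pvALit 18 (c :: t) = if c = 'h' then pvRun pvTLit pvALit 19 t else source_dir := by
  rw [pvRun, pv_g18]; split_ifs <;> rfl

set_option maxRecDepth 40000 in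
theorem pv_g19 (c : Char) : pvTLit.get? (19, c) = if c = '.' then some 20 else none := by
  by_cases h1 : c = '.'
  · subst h1; rfl
  simp [pvTLit, PySem.Dict.get?_mk_cons, pv_pair_beq, pv_gnil, h1, Ne.symm h1]

set_option maxRecDepth 40000 in
theorem pv_step19 (c : Char) (t : List Char) : pvRun pvTLit pvALit 19 (c :: t) = if c = '.' then destination_img else source_dir := by
  rw [pvRun, pv_g19]; split_ifs <;> rfl

set_option maxRecDepth 40000 in
theorem pv_g21 (c : Char) : pvTLit.get? (21, c) = if c = 'p' then some 22 else none := by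
  by_cases h1 : c = 'p'
  · subst h1; rfl
  simp [pvTLit, PySem.Dict.get?_mk_cons, pv_pair_beq, pv_gnil, h1, Ne.symm h1]

set_option maxRecDepth 40000 in
theorem pv_step21 (c : Char) (t : List Char) : pvRun pvTLit pvALit 21 (c :: t) = if c = 'p' then pvRun pvTLit pvALit 22 t else source_dir := by
  rw [pvRun, pv_g21]; split_ifs <;> rfl

set_option maxRecDepth 40000 in
theorem pv_g22 (c : Char) : pvTLit.get? (22, c) = if c = 'm' then some 23 else none := by
  by_cases h1 : c = 'm'
  · subst h1; rfl
  simp [pvTLit, PySem.Dict.get?_mk_cons, pv_pair_beq, pv_gnil, h1, Ne.symm h1]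

set_option maxRecDepth 40000 in
theorem pv_step22 (c : Char) (t : List Char) : pvRun pvTLit pvALit 22 (c :: t) = if c = 'm' then pvRun pvTLit pvALit 23 t else source_dir := by
  rw [pvRun, pv_g22]; split_ifs <;> rfl

set_option maxRecDepth 40000 in
theorem pv_g23 (c : Char) : pvTLit.get? (23, c) = if c = '.' then some 24 else none := by
  by_cases h1 : c = '.'
  · subst h1; rfl
  simp [pvTLit, PySem.Dict.get?_mk_cons, pv_pair_beq, pv_gnil, h1, Ne.symm h1]

set_option maxRecDepth 40000 in
theorem pv_step23 (c : Char) (t : List Char) : pvRun pvTLit pvALit 23 (c :: t) = if c = '.' then destination_audio else source_dir := by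
  rw [pvRun, pv_g23]; split_ifs <;> rfl

set_option maxRecDepth 40000 in
theorem pv_g25 (c : Char) : pvTLit.get? (25, c) = if c = 'a' then some 26 else if c = 'o' then some 37 else none := by
  by_cases h1 : c = 'a'
  · subst h1; rfl
  by_cases h2 : c = 'o'
  · subst h2; rfl
  simp [pvTLit, PySem.Dict.get?_mk_cons, pv_pair_beq, pv_gnil, h1, h2, Ne.symm h1, Ne.symm h2]

set_option maxRecDepth 40000 in
theorem pv_step25 (c : Char) (t : List Char) : pvRun pvTLit pvALit 25 (c :: t) = if c = 'a' then pvRun pvTLit pvALit 26 t else if c = 'o' then pvRun pvTLit pvALit 37 t else source_dir := by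
  rw [pvRun, pv_g25]; split_ifs <;> rfl

set_option maxRecDepth 40000 in
theorem pv_g26 (c : Char) : pvTLit.get? (26, c) = if c = 'w' then some 27 else none := by
  by_cases h1 : c = 'w'
  · subst h1; rfl
  simp [pvTLit, PySem.Dict.get?_mk_cons, pv_pair_beq, pv_gnil, h1, Ne.symm h1]

set_option maxRecDepth 40000 in
theorem pv_step26 (c : Char) (t : List Char) : pvRun pvTLit pvALit 26 (c :: t) = if c = 'w' then pvRun pvTLit pvALit 27 t else source_dir := by
  rw [pvRun, pv_g26]; split_ifs <;> rfl

set_option maxRecDepth 40000 in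
theorem pv_g27 (c : Char) : pvTLit.get? (27, c) = if c = '.' then some 28 else none := by
  by_cases h1 : c = '.'
  · subst h1; rfl
  simp [pvTLit, PySem.Dict.get?_mk_cons, pv_pair_beq, pv_gnil, h1, Ne.symm h1]

set_option maxRecDepth 40000 in
theorem pv_step27 (c : Char) (t : List Char) : pvRun pvTLit pvALit 27 (c :: t) = if c = '.' then destination_audio else source_dir := by
  rw [pvRun, pv_g27]; split_ifs <;> rfl

set_option maxRecDepth 40000 in
theorem pv_g29 (c : Char) : pvTLit.get? (29, c) = if c = 'p' then some 30 else none := by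
  by_cases h1 : c = 'p'
  · subst h1; rfl
  simp [pvTLit, PySem.Dict.get?_mk_cons, pv_pair_beq, pv_gnil, h1, Ne.symm h1]

set_option maxRecDepth 40000 in
theorem pv_step29 (c : Char) (t : List Char) : pvRun pvTLit pvALit 29 (c :: t) = if c = 'p' then pvRun pvTLit pvALit 30 t else source_dir := by
  rw [pvRun, pv_g29]; split_ifs <;> rfl

set_option maxRecDepth 40000 in
theorem pv_g30 (c : Char) : pvTLit.get? (30, c) = if c = 'm' then some 31 else none := by
  by_cases h1 : c = 'm'
  · subst h1; rfl
  simp [pvTLit, PySem.Dict.get?_mk_cons, pv_pair_beq, pv_gnil, h1, Ne.symm h1]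

set_option maxRecDepth 40000 in
theorem pv_step30 (c : Char) (t : List Char) : pvRun pvTLit pvALit 30 (c :: t) = if c = 'm' then pvRun pvTLit pvALit 31 t else source_dir := by
  rw [pvRun, pv_g30]; split_ifs <;> rfl

set_option maxRecDepth 40000 in
theorem pv_g31 (c : Char) : pvTLit.get? (31, c) = if c = '.' then some 32 else none := by
  by_cases h1 : c = '.'
  · subst h1; rfl
  simp [pvTLit, PySem.Dict.get?_mk_cons, pv_pair_beq, pv_gnil, h1, Ne.symm h1]

set_option maxRecDepth 40000 in
theorem pv_step31 (c : Char) (t : List Char) : pvRun pvTLit pvALit 31 (c :: t) = if c = '.' then destination_video else source_dir := by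
  rw [pvRun, pv_g31]; split_ifs <;> rfl

set_option maxRecDepth 40000 in
theorem pv_g33 (c : Char) : pvTLit.get? (33, c) = if c = 'v' then some 34 else none := by
  by_cases h1 : c = 'v'
  · subst h1; rfl
  simp [pvTLit, PySem.Dict.get?_mk_cons, pv_pair_beq, pv_gnil, h1, Ne.symm h1]

set_option maxRecDepth 40000 in
theorem pv_step33 (c : Char) (t : List Char) : pvRun pvTLit pvALit 33 (c :: t) = if c = 'v' then pvRun pvTLit pvALit 34 t else source_dir := by
  rw [pvRun, pv_g33]; split_ifs <;> rfl

set_option maxRecDepth 40000 in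
theorem pv_g34 (c : Char) : pvTLit.get? (34, c) = if c = 'a' then some 35 else none := by
  by_cases h1 : c = 'a'
  · subst h1; rfl
  simp [pvTLit, PySem.Dict.get?_mk_cons, pv_pair_beq, pv_gnil, h1, Ne.symm h1]

set_option maxRecDepth 40000 in
theorem pv_step34 (c : Char) (t : List Char) : pvRun pvTLit pvALit 34 (c :: t) = if c = 'a' then pvRun pvTLit pvALit 35 t else source_dir := by
  rw [pvRun, pv_g34]; split_ifs <;> rfl

set_option maxRecDepth 40000 in
theorem pv_g35 (c : Char) : pvTLit.get? (35, c) = if c = '.' then some 36 else none := by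
  by_cases h1 : c = '.'
  · subst h1; rfl
  simp [pvTLit, PySem.Dict.get?_mk_cons, pv_pair_beq, pv_gnil, h1, Ne.symm h1]

set_option maxRecDepth 40000 in
theorem pv_step35 (c : Char) (t : List Char) : pvRun pvTLit pvALit 35 (c :: t) = if c = '.' then destination_video else source_dir := by
  rw [pvRun, pv_g35]; split_ifs <;> rfl

set_option maxRecDepth 40000 in
theorem pv_g37 (c : Char) : pvTLit.get? (37, c) = if c = 'm' then some 38 else none := by
  by_cases h1 : c = 'm'
  · subst h1; rfl
  simp [pvTLit, PySem.Dict.get?_mk_cons, pv_pair_beq, pv_gnil, h1, Ne.symm h1]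

set_option maxRecDepth 40000 in
theorem pv_step37 (c : Char) (t : List Char) : pvRun pvTLit pvALit 37 (c :: t) = if c = 'm' then pvRun pvTLit pvALit 38 t else source_dir := by
  rw [pvRun, pv_g37]; split_ifs <;> rfl

set_option maxRecDepth 40000 in
theorem pv_g38 (c : Char) : pvTLit.get? (38, c) = if c = '.' then some 39 else none := by
  by_cases h1 : c = '.'
  · subst h1; rfl
  simp [pvTLit, PySem.Dict.get?_mk_cons, pv_pair_beq, pv_gnil, h1, Ne.symm h1]

set_option maxRecDepth 40000 in
theorem pv_step38 (c : Char) (t : List Char) : pvRun pvTLit pvALit 38 (c :: t) = if c = '.' then destination_video else source_dir := by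
  rw [pvRun, pv_g38]; split_ifs <;> rfl
theorem pv_run_nil (s : Int) : pvRun pvTLit pvALit s [] = source_dir := rfl


set_option maxHeartbeats 4000000 in
set_option maxRecDepth 40000 in
theorem pv_main (file : String) : where_to_move file = where_to_move_alt file := by
  unfold where_to_move where_to_move_alt
  rw [pv_hT, pv_hA]
  simp only [PySem.Str.endswith_eq, pv_endswith_eq_rtake, List.any_cons, List.any_nil]
  have tpdf : ".pdf".toList = ['.','p','d','f'] := rfl
  have tjpg : ".jpg".toList = ['.','j','p','g'] := rfl
  have tpng : ".png".toList = ['.','p','n','g'] := rfl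
  have tjpeg : ".jpeg".toList = ['.','j','p','e','g'] := rfl
  have theic : ".heic".toList = ['.','h','e','i','c'] := rfl
  have tmp3 : ".mp3".toList = ['.','m','p','3'] := rfl
  have twav : ".wav".toList = ['.','w','a','v'] := rfl
  have tmp4 : ".mp4".toList = ['.','m','p','4'] := rfl
  have tavi : ".avi".toList = ['.','a','v','i'] := rfl
  have tmov : ".mov".toList = ['.','m','o','v'] := rfl
  simp only [tpdf, tjpg, tpng, tjpeg, theic, tmp3, twav, tmp4, tavi, tmov,
    List.length_cons, List.length_nil, List.reverse_cons, List.reverse_nil,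
    List.nil_append, List.cons_append, Nat.reduceAdd]
  generalize file.toList.reverse = r
  rcases r with _ | ⟨a, _ | ⟨b, _ | ⟨c, _ | ⟨d, _ | ⟨e, t⟩⟩⟩⟩⟩
  · rfl
  ·
      by_cases h1 : a = 'f'
      · subst h1
        rfl
      by_cases h2 : a = 'g'
      · subst h2
        rfl
      by_cases h3 : a = 'c'
      · subst h3
        rfl
      by_cases h4 : a = '3'
      · subst h4
        rfl
      by_cases h5 : a = 'v'
      · subst h5
        rfl
      by_cases h6 : a = '4'
      · subst h6
        rfl
      by_cases h7 : a = 'i'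
      · subst h7
        rfl
      simp_all [List.cons_beq_cons, pv_run_nil, pv_step0]
  ·
      by_cases h8 : a = 'f'
      · subst h8
        by_cases h9 : b = 'd'
        · subst h9
          rfl
        simp_all [List.cons_beq_cons, pv_run_nil, pv_step0, pv_step1]
      by_cases h10 : a = 'g'
      · subst h10
        by_cases h11 : b = 'p'
        · subst h11
          rfl
        by_cases h12 : b = 'n'
        · subst h12
          rfl
        by_cases h13 : b = 'e'
        · subst h13
          rfl
        simp_all [List.cons_beq_cons, pv_run_nil, pv_step0, pv_step5]
      by_cases h14 : a = 'c'
      · subst h14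
        by_cases h15 : b = 'i'
        · subst h15
          rfl
        simp_all [List.cons_beq_cons, pv_run_nil, pv_step0, pv_step16]
      by_cases h16 : a = '3'
      · subst h16
        by_cases h17 : b = 'p'
        · subst h17
          rfl
        simp_all [List.cons_beq_cons, pv_run_nil, pv_step0, pv_step21]
      by_cases h18 : a = 'v'
      · subst h18
        by_cases h19 : b = 'a'
        · subst h19
          rfl
        by_cases h20 : b = 'o'
        · subst h20
          rfl
        simp_all [List.cons_beq_cons, pv_run_nil, pv_step0, pv_step25]
      by_cases h21 : a = '4'
      · subst h21
        by_cases h22 : b = 'p'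
        · subst h22
          rfl
        simp_all [List.cons_beq_cons, pv_run_nil, pv_step0, pv_step29]
      by_cases h23 : a = 'i'
      · subst h23
        by_cases h24 : b = 'v'
        · subst h24
          rfl
        simp_all [List.cons_beq_cons, pv_run_nil, pv_step0, pv_step33]
      simp_all [List.cons_beq_cons, pv_run_nil, pv_step0]
  ·
      by_cases h25 : a = 'f'
      · subst h25
        by_cases h26 : b = 'd'
        · subst h26
          by_cases h27 : c = 'p'
          · subst h27
            rfl
          simp_all [List.cons_beq_cons, pv_run_nil, pv_step0, pv_step1, pv_step2]
        simp_all [List.cons_beq_cons, pv_run_nil, pv_step0, pv_step1]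
      by_cases h28 : a = 'g'
      · subst h28
        by_cases h29 : b = 'p'
        · subst h29
          by_cases h30 : c = 'j'
          · subst h30
            rfl
          simp_all [List.cons_beq_cons, pv_run_nil, pv_step0, pv_step5, pv_step6]
        by_cases h31 : b = 'n'
        · subst h31
          by_cases h32 : c = 'p'
          · subst h32
            rfl
          simp_all [List.cons_beq_cons, pv_run_nil, pv_step0, pv_step5, pv_step9]
        by_cases h33 : b = 'e'
        · subst h33
          by_cases h34 : c = 'p'
          · subst h34
            rfl
          simp_all [List.cons_beq_cons, pv_run_nil, pv_step0, pv_step5, pv_step12]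
        simp_all [List.cons_beq_cons, pv_run_nil, pv_step0, pv_step5]
      by_cases h35 : a = 'c'
      · subst h35
        by_cases h36 : b = 'i'
        · subst h36
          by_cases h37 : c = 'e'
          · subst h37
            rfl
          simp_all [List.cons_beq_cons, pv_run_nil, pv_step0, pv_step16, pv_step17]
        simp_all [List.cons_beq_cons, pv_run_nil, pv_step0, pv_step16]
      by_cases h38 : a = '3'
      · subst h38
        by_cases h39 : b = 'p'
        · subst h39
          by_cases h40 : c = 'm'
          · subst h40
            rfl
          simp_all [List.cons_beq_cons, pv_run_nil, pv_step0, pv_step21, pv_step22]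
        simp_all [List.cons_beq_cons, pv_run_nil, pv_step0, pv_step21]
      by_cases h41 : a = 'v'
      · subst h41
        by_cases h42 : b = 'a'
        · subst h42
          by_cases h43 : c = 'w'
          · subst h43
            rfl
          simp_all [List.cons_beq_cons, pv_run_nil, pv_step0, pv_step25, pv_step26]
        by_cases h44 : b = 'o'
        · subst h44
          by_cases h45 : c = 'm'
          · subst h45
            rfl
          simp_all [List.cons_beq_cons, pv_run_nil, pv_step0, pv_step25, pv_step37]
        simp_all [List.cons_beq_cons, pv_run_nil, pv_step0, pv_step25]
      by_cases h46 : a = '4'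
      · subst h46
        by_cases h47 : b = 'p'
        · subst h47
          by_cases h48 : c = 'm'
          · subst h48
            rfl
          simp_all [List.cons_beq_cons, pv_run_nil, pv_step0, pv_step29, pv_step30]
        simp_all [List.cons_beq_cons, pv_run_nil, pv_step0, pv_step29]
      by_cases h49 : a = 'i'
      · subst h49
        by_cases h50 : b = 'v'
        · subst h50
          by_cases h51 : c = 'a'
          · subst h51
            rfl
          simp_all [List.cons_beq_cons, pv_run_nil, pv_step0, pv_step33, pv_step34]
        simp_all [List.cons_beq_cons, pv_run_nil, pv_step0, pv_step33]
      simp_all [List.cons_beq_cons, pv_run_nil, pv_step0]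
  ·
      by_cases h52 : a = 'f'
      · subst h52
        by_cases h53 : b = 'd'
        · subst h53
          by_cases h54 : c = 'p'
          · subst h54
            by_cases h55 : d = '.'
            · subst h55; rfl
            simp_all [List.cons_beq_cons, pv_run_nil, pv_step0, pv_step1, pv_step2, pv_step3]
          simp_all [List.cons_beq_cons, pv_run_nil, pv_step0, pv_step1, pv_step2]
        simp_all [List.cons_beq_cons, pv_run_nil, pv_step0, pv_step1]
      by_cases h56 : a = 'g'
      · subst h56
        by_cases h57 : b = 'p'
        · subst h57
          by_cases h58 : c = 'j'
          · subst h58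
            by_cases h59 : d = '.'
            · subst h59; rfl
            simp_all [List.cons_beq_cons, pv_run_nil, pv_step0, pv_step5, pv_step6, pv_step7]
          simp_all [List.cons_beq_cons, pv_run_nil, pv_step0, pv_step5, pv_step6]
        by_cases h60 : b = 'n'
        · subst h60
          by_cases h61 : c = 'p'
          · subst h61
            by_cases h62 : d = '.'
            · subst h62; rfl
            simp_all [List.cons_beq_cons, pv_run_nil, pv_step0, pv_step5, pv_step9, pv_step10]
          simp_all [List.cons_beq_cons, pv_run_nil, pv_step0, pv_step5, pv_step9]
        by_cases h63 : b = 'e'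
        · subst h63
          by_cases h64 : c = 'p'
          · subst h64
            by_cases h65 : d = 'j'
            · subst h65
              rfl
            simp_all [List.cons_beq_cons, pv_run_nil, pv_step0, pv_step5, pv_step12, pv_step13]
          simp_all [List.cons_beq_cons, pv_run_nil, pv_step0, pv_step5, pv_step12]
        simp_all [List.cons_beq_cons, pv_run_nil, pv_step0, pv_step5]
      by_cases h66 : a = 'c'
      · subst h66
        by_cases h67 : b = 'i'
        · subst h67
          by_cases h68 : c = 'e'
          · subst h68
            by_cases h69 : d = 'h'
            · subst h69
              rfl
            simp_all [List.cons_beq_cons, pv_run_nil, pv_step0, pv_step16, pv_step17, pv_step18]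
          simp_all [List.cons_beq_cons, pv_run_nil, pv_step0, pv_step16, pv_step17]
        simp_all [List.cons_beq_cons, pv_run_nil, pv_step0, pv_step16]
      by_cases h70 : a = '3'
      · subst h70
        by_cases h71 : b = 'p'
        · subst h71
          by_cases h72 : c = 'm'
          · subst h72
            by_cases h73 : d = '.'
            · subst h73; rfl
            simp_all [List.cons_beq_cons, pv_run_nil, pv_step0, pv_step21, pv_step22, pv_step23]
          simp_all [List.cons_beq_cons, pv_run_nil, pv_step0, pv_step21, pv_step22]
        simp_all [List.cons_beq_cons, pv_run_nil, pv_step0, pv_step21]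
      by_cases h74 : a = 'v'
      · subst h74
        by_cases h75 : b = 'a'
        · subst h75
          by_cases h76 : c = 'w'
          · subst h76
            by_cases h77 : d = '.'
            · subst h77; rfl
            simp_all [List.cons_beq_cons, pv_run_nil, pv_step0, pv_step25, pv_step26, pv_step27]
          simp_all [List.cons_beq_cons, pv_run_nil, pv_step0, pv_step25, pv_step26]
        by_cases h78 : b = 'o'
        · subst h78
          by_cases h79 : c = 'm'
          · subst h79
            by_cases h80 : d = '.'
            · subst h80; rfl
            simp_all [List.cons_beq_cons, pv_run_nil, pv_step0, pv_step25, pv_step37, pv_step38]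
          simp_all [List.cons_beq_cons, pv_run_nil, pv_step0, pv_step25, pv_step37]
        simp_all [List.cons_beq_cons, pv_run_nil, pv_step0, pv_step25]
      by_cases h81 : a = '4'
      · subst h81
        by_cases h82 : b = 'p'
        · subst h82
          by_cases h83 : c = 'm'
          · subst h83
            by_cases h84 : d = '.'
            · subst h84; rfl
            simp_all [List.cons_beq_cons, pv_run_nil, pv_step0, pv_step29, pv_step30, pv_step31]
          simp_all [List.cons_beq_cons, pv_run_nil, pv_step0, pv_step29, pv_step30]
        simp_all [List.cons_beq_cons, pv_run_nil, pv_step0, pv_step29]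
      by_cases h85 : a = 'i'
      · subst h85
        by_cases h86 : b = 'v'
        · subst h86
          by_cases h87 : c = 'a'
          · subst h87
            by_cases h88 : d = '.'
            · subst h88; rfl
            simp_all [List.cons_beq_cons, pv_run_nil, pv_step0, pv_step33, pv_step34, pv_step35]
          simp_all [List.cons_beq_cons, pv_run_nil, pv_step0, pv_step33, pv_step34]
        simp_all [List.cons_beq_cons, pv_run_nil, pv_step0, pv_step33]
      simp_all [List.cons_beq_cons, pv_run_nil, pv_step0]
  ·
      by_cases h89 : a = 'f'
      · subst h89
        by_cases h90 : b = 'd'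
        · subst h90
          by_cases h91 : c = 'p'
          · subst h91
            by_cases h92 : d = '.'
            · subst h92; rfl
            simp_all [List.cons_beq_cons, pv_run_nil, pv_step0, pv_step1, pv_step2, pv_step3]
          simp_all [List.cons_beq_cons, pv_run_nil, pv_step0, pv_step1, pv_step2]
        simp_all [List.cons_beq_cons, pv_run_nil, pv_step0, pv_step1]
      by_cases h93 : a = 'g'
      · subst h93
        by_cases h94 : b = 'p'
        · subst h94
          by_cases h95 : c = 'j'
          · subst h95
            by_cases h96 : d = '.'
            · subst h96; rfl
            simp_all [List.cons_beq_cons, pv_run_nil, pv_step0, pv_step5, pv_step6, pv_step7]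
          simp_all [List.cons_beq_cons, pv_run_nil, pv_step0, pv_step5, pv_step6]
        by_cases h97 : b = 'n'
        · subst h97
          by_cases h98 : c = 'p'
          · subst h98
            by_cases h99 : d = '.'
            · subst h99; rfl
            simp_all [List.cons_beq_cons, pv_run_nil, pv_step0, pv_step5, pv_step9, pv_step10]
          simp_all [List.cons_beq_cons, pv_run_nil, pv_step0, pv_step5, pv_step9]
        by_cases h100 : b = 'e'
        · subst h100
          by_cases h101 : c = 'p'
          · subst h101
            by_cases h102 : d = 'j'
            · subst h102
              by_cases h103 : e = '.'
              · subst h103; rfl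
              simp_all [List.cons_beq_cons, pv_run_nil, pv_step0, pv_step5, pv_step12, pv_step13, pv_step14]
            simp_all [List.cons_beq_cons, pv_run_nil, pv_step0, pv_step5, pv_step12, pv_step13]
          simp_all [List.cons_beq_cons, pv_run_nil, pv_step0, pv_step5, pv_step12]
        simp_all [List.cons_beq_cons, pv_run_nil, pv_step0, pv_step5]
      by_cases h104 : a = 'c'
      · subst h104
        by_cases h105 : b = 'i'
        · subst h105
          by_cases h106 : c = 'e'
          · subst h106
            by_cases h107 : d = 'h'
            · subst h107
              by_cases h108 : e = '.'
              · subst h108; rfl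
              simp_all [List.cons_beq_cons, pv_run_nil, pv_step0, pv_step16, pv_step17, pv_step18, pv_step19]
            simp_all [List.cons_beq_cons, pv_run_nil, pv_step0, pv_step16, pv_step17, pv_step18]
          simp_all [List.cons_beq_cons, pv_run_nil, pv_step0, pv_step16, pv_step17]
        simp_all [List.cons_beq_cons, pv_run_nil, pv_step0, pv_step16]
      by_cases h109 : a = '3'
      · subst h109
        by_cases h110 : b = 'p'
        · subst h110
          by_cases h111 : c = 'm'
          · subst h111
            by_cases h112 : d = '.'
            · subst h112; rfl
            simp_all [List.cons_beq_cons, pv_run_nil, pv_step0, pv_step21, pv_step22, pv_step23]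
          simp_all [List.cons_beq_cons, pv_run_nil, pv_step0, pv_step21, pv_step22]
        simp_all [List.cons_beq_cons, pv_run_nil, pv_step0, pv_step21]
      by_cases h113 : a = 'v'
      · subst h113
        by_cases h114 : b = 'a'
        · subst h114
          by_cases h115 : c = 'w'
          · subst h115
            by_cases h116 : d = '.'
            · subst h116; rfl
            simp_all [List.cons_beq_cons, pv_run_nil, pv_step0, pv_step25, pv_step26, pv_step27]
          simp_all [List.cons_beq_cons, pv_run_nil, pv_step0, pv_step25, pv_step26]
        by_cases h117 : b = 'o'
        · subst h117
          by_cases h118 : c = 'm'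
          · subst h118
            by_cases h119 : d = '.'
            · subst h119; rfl
            simp_all [List.cons_beq_cons, pv_run_nil, pv_step0, pv_step25, pv_step37, pv_step38]
          simp_all [List.cons_beq_cons, pv_run_nil, pv_step0, pv_step25, pv_step37]
        simp_all [List.cons_beq_cons, pv_run_nil, pv_step0, pv_step25]
      by_cases h120 : a = '4'
      · subst h120
        by_cases h121 : b = 'p'
        · subst h121
          by_cases h122 : c = 'm'
          · subst h122
            by_cases h123 : d = '.'
            · subst h123; rfl
            simp_all [List.cons_beq_cons, pv_run_nil, pv_step0, pv_step29, pv_step30, pv_step31]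
          simp_all [List.cons_beq_cons, pv_run_nil, pv_step0, pv_step29, pv_step30]
        simp_all [List.cons_beq_cons, pv_run_nil, pv_step0, pv_step29]
      by_cases h124 : a = 'i'
      · subst h124
        by_cases h125 : b = 'v'
        · subst h125
          by_cases h126 : c = 'a'
          · subst h126
            by_cases h127 : d = '.'
            · subst h127; rfl
            simp_all [List.cons_beq_cons, pv_run_nil, pv_step0, pv_step33, pv_step34, pv_step35]
          simp_all [List.cons_beq_cons, pv_run_nil, pv_step0, pv_step33, pv_step34]
        simp_all [List.cons_beq_cons, pv_run_nil, pv_step0, pv_step33]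
      simp_all [List.cons_beq_cons, pv_run_nil, pv_step0]

-- ===== VERDICT (by name: the statement is the Claim_ definition above) =====
theorem where_to_move_spec : Claim_equal_where_to_move := by
  intro file _
  unfold Spec_where_to_move
  exact pv_main file
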